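-- pv_equiv track=rewrite | github.com/V-Wong/advent-of-code-2020 | src/day6.py | count_all_answered
-- ===== SOURCE A (Python) =====
-- from typing import List
-- from collections import Counter, defaultdict
--
-- def count_all_answered(group: List[str]) -> int:
--     answer_count = defaultdict(lambda: 0)
--
--     for person in group:
--         person_answers = set()
--         for answer in person:
--             if answer not in person_answers:
--                 answer_count[answer] += 1
--                 person_answers.add(answer)
--
--     return sum(1 for answer, count in answer_count.items() if count == len(group))
-- ===== SOURCE B (Python) =====
-- def count_all_answered(group):
--     if not group:
--         return 0
--     common = set(group[0])
--     for person in group[1:]: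
--         common &= set(person)
--     return len(common)
-- ===== Notes on version B (the rewrite author's own statement) =====
-- stated objective: idiomatic
-- what changed: Replaces the per-character vote-counting dict plus final count==len(group) filter with a direct set-intersection fold over the persons' answer sets (empty group returns 0).
import Mathlib
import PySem

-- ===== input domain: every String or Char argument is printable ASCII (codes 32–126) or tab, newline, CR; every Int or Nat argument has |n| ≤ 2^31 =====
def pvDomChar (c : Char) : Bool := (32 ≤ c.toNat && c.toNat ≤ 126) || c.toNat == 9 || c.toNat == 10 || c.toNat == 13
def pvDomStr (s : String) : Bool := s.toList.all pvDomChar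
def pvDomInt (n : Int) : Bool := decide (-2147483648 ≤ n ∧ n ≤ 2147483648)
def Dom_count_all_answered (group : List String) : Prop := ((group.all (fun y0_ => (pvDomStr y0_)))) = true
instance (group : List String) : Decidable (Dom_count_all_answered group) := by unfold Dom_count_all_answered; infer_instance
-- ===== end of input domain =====

-- B replaces A's per-character vote-counting dict (count == len(group) filter) with a
-- direct fold of set intersection over the persons' answer sets (idiomatic; same cost).

-- ===== PORT A =====
-- one person's inner loop: the (answer_count, person_answers) state, step for step
def pvStepA (st : PySem.Dict Char Int × PySem.Set Char) (answer : Char) :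
    PySem.Dict Char Int × PySem.Set Char :=
  if PySem.Set.contains st.2 answer then st
  else (st.1.modify answer 0 (· + 1), PySem.Set.add st.2 answer)

def count_all_answered (group : List String) : Int :=
  let answer_count : PySem.Dict Char Int :=
    group.foldl
      (fun d person => (person.toList.foldl pvStepA (d, PySem.Set.empty)).1)
      PySem.Dict.empty
  ((answer_count.items.filter (fun kv => kv.2 == (group.length : Int))).length : Int)

-- ===== PORT B =====
def count_all_answered_alt (group : List String) : Int :=
  match group with
  | [] => 0
  | g :: gs =>
    ((gs.foldl
        (fun common person => PySem.Set.inter common (PySem.Set.ofList person.toList))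
        (PySem.Set.ofList g.toList)).length : Int)

-- ===== PRECONDITION & SPEC =====
def Spec_count_all_answered (group : List String) (out : Int) : Prop := out = count_all_answered_alt group
instance (group : List String) (out : Int) : Decidable (Spec_count_all_answered group out) := by unfold Spec_count_all_answered; infer_instance

-- ===== CLAIM (what is proved, stated in full; the proofs are below) =====
def Claim_equal_count_all_answered : Prop := ∀ (group : List String), Dom_count_all_answered group → Spec_count_all_answered group (count_all_answered group)

-- ===== LEMMAS AND PROOFS =====

-- inner loop of A: the count at c grows by 1 iff c occurs in cs and was not yet in the person set
theorem pvInnerA_getD (cs : List Char) (d : PySem.Dict Char Int) (s : PySem.Set Char) (c : Char) :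
    ((cs.foldl pvStepA (d, s)).1).getD c 0
      = d.getD c 0 + (if c ∈ cs ∧ c ∉ s then 1 else 0) := by
  induction cs generalizing d s with
  | nil => simp
  | cons a cs ih =>
    simp only [List.foldl_cons, pvStepA]
    by_cases hs : PySem.Set.contains s a
    · have ha : a ∈ s := (PySem.Set.contains_iff s a).mp hs
      rw [if_pos hs, ih d s]
      by_cases hc : c = a
      · subst hc; simp [ha]
      · simp [List.mem_cons, hc]
    · rw [if_neg hs]
      have ha : a ∉ s := fun h => hs ((PySem.Set.contains_iff s a).mpr h)
      rw [ih]
      by_cases hc : c = a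
      · subst hc
        simp [PySem.Dict.getD_modify_self, ha]
      · rw [PySem.Dict.getD_modify]
        simp [List.mem_cons, hc, PySem.Set.mem_add]

theorem pvInnerA_keys_mem (cs : List Char) (d : PySem.Dict Char Int) (s : PySem.Set Char) (c : Char) :
    c ∈ ((cs.foldl pvStepA (d, s)).1).keys ↔ c ∈ d.keys ∨ (c ∈ cs ∧ c ∉ s) := by
  induction cs generalizing d s with
  | nil => simp
  | cons a cs ih =>
    simp only [List.foldl_cons, pvStepA]
    by_cases hs : PySem.Set.contains s a
    · have ha : a ∈ s := (PySem.Set.contains_iff s a).mp hs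
      rw [if_pos hs, ih]
      by_cases hc : c = a
      · subst hc; simp [ha]
      · simp [List.mem_cons, hc]
    · rw [if_neg hs]
      have ha : a ∉ s := fun h => hs ((PySem.Set.contains_iff s a).mpr h)
      rw [ih, PySem.Dict.keys_modify, PySem.Dict.mem_keys_insert]
      by_cases hc : c = a
      · subst hc; simp [ha]
      · simp [List.mem_cons, hc, PySem.Set.mem_add]

theorem pvInnerA_nodup (cs : List Char) (d : PySem.Dict Char Int) (s : PySem.Set Char)
    (h : d.keys.Nodup) : ((cs.foldl pvStepA (d, s)).1).keys.Nodup := by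
  induction cs generalizing d s with
  | nil => exact h
  | cons a cs ih =>
    simp only [List.foldl_cons, pvStepA]
    by_cases hs : PySem.Set.contains s a
    · rw [if_pos hs]; exact ih d s h
    · rw [if_neg hs]
      exact ih _ _ (PySem.Dict.nodup_keys_insert _ _ _ h)

-- the whole counting loop of A
theorem pvOuterA_getD (group : List String) (d : PySem.Dict Char Int) (c : Char) :
    ((group.foldl (fun d person => (person.toList.foldl pvStepA (d, PySem.Set.empty)).1) d).getD c 0)
      = d.getD c 0 + (group.countP (fun p => decide (c ∈ p.toList)) : Int) := by
  induction group generalizing d with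
  | nil => simp
  | cons g gs ih =>
    simp only [List.foldl_cons]
    rw [ih, pvInnerA_getD]
    rw [List.countP_cons]
    by_cases hc : c ∈ g.toList
    · simp [hc, PySem.Set.empty]; ring
    · simp [hc, PySem.Set.empty]

theorem pvOuterA_keys_mem (group : List String) (d : PySem.Dict Char Int) (c : Char) :
    c ∈ (group.foldl (fun d person => (person.toList.foldl pvStepA (d, PySem.Set.empty)).1) d).keys
      ↔ c ∈ d.keys ∨ ∃ p ∈ group, c ∈ p.toList := by
  induction group generalizing d with
  | nil => simp
  | cons g gs ih =>
    simp only [List.foldl_cons]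
    rw [ih, pvInnerA_keys_mem]
    simp [PySem.Set.empty]
    tauto

theorem pvOuterA_nodup (group : List String) (d : PySem.Dict Char Int) (h : d.keys.Nodup) :
    (group.foldl (fun d person => (person.toList.foldl pvStepA (d, PySem.Set.empty)).1) d).keys.Nodup := by
  induction group generalizing d with
  | nil => exact h
  | cons g gs ih =>
    simp only [List.foldl_cons]
    exact ih _ (pvInnerA_nodup _ _ _ h)

-- B's fold: membership and nodup
theorem pvB_mem (gs : List String) (S : PySem.Set Char) (c : Char) :
    c ∈ gs.foldl (fun common person => PySem.Set.inter common (PySem.Set.ofList person.toList)) S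
      ↔ c ∈ S ∧ ∀ p ∈ gs, c ∈ p.toList := by
  induction gs generalizing S with
  | nil => simp
  | cons g gs ih =>
    simp only [List.foldl_cons]
    rw [ih, PySem.Set.mem_inter, PySem.Set.mem_ofList]
    simp
    tauto

theorem pvB_nodup (gs : List String) (S : PySem.Set Char) (h : S.Nodup) :
    (gs.foldl (fun common person => PySem.Set.inter common (PySem.Set.ofList person.toList)) S).Nodup := by
  induction gs generalizing S with
  | nil => exact h
  | cons g gs ih =>
    simp only [List.foldl_cons]
    exact ih _ (PySem.Set.nodup_inter _ _ h)

-- ===== VERDICT (by name: the statement is the Claim_ definition above) =====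
theorem count_all_answered_spec : Claim_equal_count_all_answered := by
  intro group _
  unfold Spec_count_all_answered
  cases group with
  | nil => rfl
  | cons g gs =>
    unfold count_all_answered count_all_answered_alt
    set n := (g :: gs).length with hn
    set D := (g :: gs).foldl
        (fun d person => (person.toList.foldl pvStepA (d, PySem.Set.empty)).1)
        PySem.Dict.empty with hD
    have hnd : D.keys.Nodup := pvOuterA_nodup _ _ PySem.Dict.nodup_keys_empty
    have hget : ∀ c, D.getD c 0 = ((g :: gs).countP (fun p => decide (c ∈ p.toList)) : Int) := by
      intro c; rw [hD, pvOuterA_getD]; simp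
    have hkey : ∀ c, c ∈ D.keys ↔ ∃ p ∈ (g :: gs), c ∈ p.toList := by
      intro c; rw [hD, pvOuterA_keys_mem]; simp
    -- A's filtered items list has the same length as the keys filtered by the predicate
    have hitems : D.items = D.keys.map (fun k => (k, D.getD k 0)) :=
      PySem.Dict.items_eq_map_keys D hnd 0
    simp only [hitems, List.filter_map, List.length_map]
    -- identify the two nodup lists by membership
    set K := D.keys.filter (fun k =>
      ((fun kv : Char × Int => kv.2 == (n : Int)) ∘ fun k => (k, D.getD k 0)) k) with hK
    set S := gs.foldl
        (fun common person => PySem.Set.inter common (PySem.Set.ofList person.toList))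
        (PySem.Set.ofList g.toList) with hS
    have hKn : K.Nodup := hnd.filter _
    have hSn : S.Nodup := pvB_nodup _ _ (PySem.Set.nodup_ofList _)
    have hmem : ∀ c, c ∈ K ↔ c ∈ S := by
      intro c
      rw [hK, List.mem_filter, hS, pvB_mem, PySem.Set.mem_ofList]
      simp only [Function.comp, beq_iff_eq]
      rw [hkey, hget]
      constructor
      · rintro ⟨_, hcnt⟩
        have hcnt' : (g :: gs).countP (fun p => decide (c ∈ p.toList)) = n := by
          exact_mod_cast hcnt
        have hall := List.countP_eq_length.mp (hn ▸ hcnt')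
        exact ⟨by simpa using hall g (by simp), fun p hp => by simpa using hall p (by simp [hp])⟩
      · rintro ⟨hg, hall⟩
        have hall' : ∀ p ∈ (g :: gs), decide (c ∈ p.toList) = true := by
          intro p hp
          rcases List.mem_cons.mp hp with rfl | hp'
          · simpa using hg
          · simpa using hall p hp'
        refine ⟨⟨g, by simp, hg⟩, ?_⟩
        rw [List.countP_eq_length.mpr hall']
    have hperm : K.Perm S := (List.perm_ext_iff_of_nodup hKn hSn).mpr hmem
    exact_mod_cast hperm.length_eq
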